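-- pv_equiv track=rewrite | github.com/lucasdeb/Informatica-General | Practica 5/5,10.py | entext
-- ===== SOURCE A (Python) =====
-- def entext(text,pal):
--     cont = 0
--     comp = ""
--     true = 0
--     false = 0
--     while cont != len(text):
--         if (("a"<=text[cont]<="z") or ("A"<=text[cont]<="Z")) == True:
--             comp += text[cont]
--             cont += 1
--         else:
--             for i in pal:
--                 if ((("a"<=i<="z") or ("A"<=i<="Z")) == True) and ((i in comp) == True):
--                     true += 1
--                 else:
--                     false += 1
--             if true == len(pal):
--                 return True
--             else:
--                 comp = ""
--                 cont += 1
--                 true = 0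
--                 false = 0
--     for i in pal:
--         if ((("a"<=i<="z") or ("A"<=i<="Z")) == True) and ((i in comp) == True):
--             true += 1
--         else:
--             false += 1
--     if true == len(pal):
--         return True
--     else:
--         return False
-- ===== SOURCE B (Python) =====
-- # B: bitmask index -- pal is compiled once into a 52-bit letter mask; the scan keeps only a
-- # running mask of the current word and tests subset by one AND, so the per-boundary loop over
-- # pal and the per-char 'in comp' scans of A disappear.
-- def entext(text, pal):
--     need = 0
--     for c in pal:
--         if 'a' <= c <= 'z':
--             need |= 1 << (ord(c) - 97)
--         elif 'A' <= c <= 'Z':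
--             need |= 1 << (26 + ord(c) - 65)
--         else:
--             return False
--     have = 0
--     for ch in text:
--         if 'a' <= ch <= 'z':
--             have |= 1 << (ord(ch) - 97)
--         elif 'A' <= ch <= 'Z':
--             have |= 1 << (26 + ord(ch) - 65)
--         else:
--             if need & have == need:
--                 return True
--             have = 0
--     return need & have == need
-- ===== Notes on version B (the rewrite author's own statement) =====
-- stated objective: faster
-- what changed: Replaced A's per-boundary rescans of pal with string membership tests by a 52-bit letter bitmask: pal is compiled once into a needed-letters mask (rejecting non-letter pal chars up front), the scan keeps only a running bitmask of the current word, and each boundary check is a single AND-subset test.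
import Mathlib
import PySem

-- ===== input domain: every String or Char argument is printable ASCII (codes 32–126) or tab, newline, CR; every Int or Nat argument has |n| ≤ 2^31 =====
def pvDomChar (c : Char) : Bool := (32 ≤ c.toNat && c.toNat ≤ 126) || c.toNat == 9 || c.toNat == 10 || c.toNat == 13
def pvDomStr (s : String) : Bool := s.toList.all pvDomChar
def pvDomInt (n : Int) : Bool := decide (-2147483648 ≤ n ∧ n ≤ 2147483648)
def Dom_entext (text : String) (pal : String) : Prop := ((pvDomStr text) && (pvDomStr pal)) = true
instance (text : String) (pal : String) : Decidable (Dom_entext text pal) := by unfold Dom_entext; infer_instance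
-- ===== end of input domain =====

-- B compiles pal once into a 52-bit letter bitmask and keeps a running bitmask of the current
-- word, so A's per-boundary pal loop and string-membership scans become one AND-subset test.

-- ===== PORT A =====
-- "a"<=c<="z" or "A"<=c<="Z", in A's order
def pvIsL (c : Char) : Bool := (decide ('a' ≤ c) && decide (c ≤ 'z')) || (decide ('A' ≤ c) && decide (c ≤ 'Z'))

-- A's inner `for i in pal` counting loop over (true, false)
def pvPalCount (pal comp : List Char) (tr fa : Nat) : Nat × Nat :=
  pal.foldl (fun p i => if pvIsL i && comp.contains i then (p.1 + 1, p.2) else (p.1, p.2 + 1)) (tr, fa)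

-- A's while loop over text; comp/tr/fa are the mutable state
def pvEntextLoop (pal : List Char) : List Char → List Char → Nat → Nat → Bool
  | [], comp, tr, fa =>
      decide ((pvPalCount pal comp tr fa).1 = pal.length)
  | ch :: rest, comp, tr, fa =>
      if pvIsL ch then pvEntextLoop pal rest (comp ++ [ch]) tr fa
      else
        let p := pvPalCount pal comp tr fa
        if p.1 = pal.length then true
        else pvEntextLoop pal rest [] 0 0

def entext (text : String) (pal : String) : Bool :=
  pvEntextLoop pal.toList text.toList [] 0 0

-- ===== PORT B =====
-- B's two letter branches: the bit index of a letter ('a'..'z' -> 0..25, 'A'..'Z' -> 26..51)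
def pvBit (c : Char) : Option Nat :=
  if decide ('a' ≤ c) && decide (c ≤ 'z') then some (c.toNat - 97)
  else if decide ('A' ≤ c) && decide (c ≤ 'Z') then some (26 + (c.toNat - 65))
  else none

-- B's first loop: compile pal into the needed-letters mask; none = early `return False`
def pvNeedLoop : List Char → Nat → Option Nat
  | [], acc => some acc
  | c :: rest, acc =>
      match pvBit c with
      | some b => pvNeedLoop rest (acc ||| (1 <<< b))
      | none => none

-- B's second loop: running mask `have` of the current word, subset test at each boundary
def pvHaveLoop (need : Nat) : List Char → Nat → Bool
  | [], hv => need &&& hv == need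
  | ch :: rest, hv =>
      match pvBit ch with
      | some b => pvHaveLoop need rest (hv ||| (1 <<< b))
      | none => if need &&& hv == need then true else pvHaveLoop need rest 0

def entext_alt (text : String) (pal : String) : Bool :=
  match pvNeedLoop pal.toList 0 with
  | none => false
  | some need => pvHaveLoop need text.toList 0

-- ===== PRECONDITION & SPEC =====
def Spec_entext (text : String) (pal : String) (out : Bool) : Prop := out = entext_alt text pal
instance (text : String) (pal : String) (out : Bool) : Decidable (Spec_entext text pal out) := by unfold Spec_entext; infer_instance

-- ===== CLAIM (what is proved, stated in full; the proofs are below) =====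
def Claim_equal_entext : Prop := ∀ (text : String) (pal : String), Dom_entext text pal → Spec_entext text pal (entext text pal)

-- ===== LEMMAS AND PROOFS =====

-- mask of a collected word, as B maintains it (fold of single-bit ors)
def pvMask (comp : List Char) : Nat :=
  comp.foldl (fun m c => match pvBit c with | some b => m ||| (1 <<< b) | none => m) 0

theorem pvCharEq {c c' : Char} (h : c.toNat = c'.toNat) : c = c' := by
  have := congrArg Char.ofNat h
  rwa [Char.ofNat_toNat, Char.ofNat_toNat] at this

theorem pvLeIff {c d : Char} : c ≤ d ↔ c.toNat ≤ d.toNat := Iff.rfl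

theorem pvBit_none_iff (c : Char) : pvBit c = none ↔ pvIsL c = false := by
  unfold pvBit pvIsL
  split_ifs with h1 h2 <;> simp_all

theorem pvBit_inj {c c' : Char} {b : Nat} (h : pvBit c = some b) (h' : pvBit c' = some b) :
    c = c' := by
  unfold pvBit at h h'
  apply pvCharEq
  split_ifs at h h' <;>
    simp only [Bool.and_eq_true, decide_eq_true_eq, pvLeIff, Char.reduceToNat,
      Option.some.injEq] at * <;>
    omega

theorem pvPalCount_fst (pal comp : List Char) (tr fa : Nat) :
    (pvPalCount pal comp tr fa).1 = tr + pal.countP (fun i => pvIsL i && comp.contains i) := by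
  induction pal generalizing tr fa with
  | nil => simp [pvPalCount]
  | cons i pal ih =>
      by_cases h : (pvIsL i && comp.contains i) = true
      · have hp1 : pvIsL i = true ∧ i ∈ comp := by simpa using h
        have h1 : pvPalCount (i :: pal) comp tr fa = pvPalCount pal comp (tr + 1) fa := by
          simp [pvPalCount, hp1]
        rw [h1, ih, List.countP_cons_of_pos (p := fun i => pvIsL i && comp.contains i) h]
        omega
      · have hp1 : ¬(pvIsL i = true ∧ i ∈ comp) := by simpa using h
        have h1 : pvPalCount (i :: pal) comp tr fa = pvPalCount pal comp tr (fa + 1) := by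
          simp [pvPalCount, hp1]
        rw [h1, ih, List.countP_cons_of_neg (p := fun i => pvIsL i && comp.contains i) h]

-- A's boundary test, as a universally quantified statement
theorem pvCheck_iff (pal comp : List Char) :
    (pvPalCount pal comp 0 0).1 = pal.length ↔ ∀ i ∈ pal, pvIsL i = true ∧ i ∈ comp := by
  rw [pvPalCount_fst]
  simp only [Nat.zero_add, List.countP_eq_length]
  constructor
  · intro h i hi; simpa using h i hi
  · intro h i hi; simpa using h i hi

-- bits of a fold-built mask
theorem pvMask_testBit_aux (comp : List Char) :
    ∀ (m : Nat) (i : Nat),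
      (comp.foldl (fun m c => match pvBit c with | some b => m ||| (1 <<< b) | none => m) m).testBit i
        = (m.testBit i || comp.any (fun c => pvBit c == some i)) := by
  induction comp with
  | nil => intro m i; simp
  | cons c rest ih =>
      intro m i
      simp only [List.foldl_cons, List.any_cons]
      cases hb : pvBit c with
      | none => rw [ih]; simp
      | some b =>
          rw [ih]
          simp only [Nat.testBit_or, Nat.one_shiftLeft, Nat.testBit_two_pow]
          by_cases hib : b = i
          · subst hib; simp
          · simp [hib, beq_eq_false_iff_ne.mpr hib]

theorem pvMask_testBit (comp : List Char) (i : Nat) :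
    (pvMask comp).testBit i = comp.any (fun c => pvBit c == some i) := by
  rw [pvMask, pvMask_testBit_aux]; simp

-- the subset test as A N D equality
theorem pvSubset_iff (need hv : Nat) :
    ((need &&& hv == need) = true) ↔ ∀ i, need.testBit i = true → hv.testBit i = true := by
  constructor
  · intro h i hi
    have h' : need &&& hv = need := by simpa using h
    have ht := congrArg (fun x => Nat.testBit x i) h'
    simp only [Nat.testBit_and, hi, Bool.true_and] at ht
    exact ht
  · intro h
    simp only [beq_iff_eq]
    apply Nat.eq_of_testBit_eq
    intro i
    simp only [Nat.testBit_and]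
    by_cases hn : need.testBit i = true
    · simp [hn, h i hn]
    · simp [Bool.eq_false_iff.mpr hn]

-- compiled pal mask: success characterisation
theorem pvNeedLoop_some (pal : List Char) :
    ∀ (acc need : Nat), pvNeedLoop pal acc = some need →
      (∀ c ∈ pal, pvIsL c = true) ∧
      (∀ i, need.testBit i = (acc.testBit i || pal.any (fun c => pvBit c == some i))) := by
  induction pal with
  | nil =>
      intro acc need h
      simp only [pvNeedLoop, Option.some.injEq] at h
      subst h; simp
  | cons c rest ih =>
      intro acc need h
      simp only [pvNeedLoop] at h
      cases hb : pvBit c with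
      | none => rw [hb] at h; simp at h
      | some b =>
          rw [hb] at h
          obtain ⟨hall, hbits⟩ := ih _ _ h
          refine ⟨?_, ?_⟩
          · intro x hx
            rcases List.mem_cons.mp hx with rfl | hx
            · by_contra hL
              have : pvBit x = none := (pvBit_none_iff x).mpr (by simpa using hL)
              simp [this] at hb
            · exact hall x hx
          · intro i
            rw [hbits i]
            simp only [Nat.testBit_or, Nat.one_shiftLeft, Nat.testBit_two_pow, List.any_cons, hb]
            by_cases hib : b = i
            · subst hib; simp
            · simp [hib, beq_eq_false_iff_ne.mpr hib, Bool.or_comm]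

theorem pvNeedLoop_none (pal : List Char) :
    ∀ acc, pvNeedLoop pal acc = none → ∃ c ∈ pal, pvIsL c = false := by
  induction pal with
  | nil => intro acc h; simp [pvNeedLoop] at h
  | cons c rest ih =>
      intro acc h
      simp only [pvNeedLoop] at h
      cases hb : pvBit c with
      | none => exact ⟨c, by simp, (pvBit_none_iff c).mp hb⟩
      | some b =>
          rw [hb] at h
          obtain ⟨x, hx, hL⟩ := ih _ h
          exact ⟨x, by simp [hx], hL⟩

-- boundary equivalence: A's count test = B's AND-subset test
theorem pvBoundary (pal comp : List Char) (need : Nat)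
    (hneed : pvNeedLoop pal 0 = some need) :
    decide ((pvPalCount pal comp 0 0).1 = pal.length) = (need &&& pvMask comp == need) := by
  obtain ⟨hall, hbits⟩ := pvNeedLoop_some pal 0 need hneed
  have hiff : ((pvPalCount pal comp 0 0).1 = pal.length)
      ↔ ((need &&& pvMask comp == need) = true) := by
    rw [pvCheck_iff, pvSubset_iff]
    constructor
    · intro hforall i hi
      rw [hbits i] at hi
      simp only [Nat.zero_testBit, Bool.false_or, List.any_eq_true, beq_iff_eq] at hi
      obtain ⟨c, hc, hcb⟩ := hi
      rw [pvMask_testBit]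
      exact List.any_eq_true.mpr ⟨c, (hforall c hc).2, by simp [hcb]⟩
    · intro hsub i hi
      refine ⟨hall i hi, ?_⟩
      cases hb : pvBit i with
      | none => exact absurd ((pvBit_none_iff i).mp hb) (by simp [hall i hi])
      | some b =>
          have hneed_b : need.testBit b = true := by
            rw [hbits b]
            simp only [Nat.zero_testBit, Bool.false_or, List.any_eq_true]
            exact ⟨i, hi, by simp [hb]⟩
          have hm := hsub b hneed_b
          rw [pvMask_testBit] at hm
          obtain ⟨c, hc, hcb⟩ := List.any_eq_true.mp hm
          exact (pvBit_inj (by simpa using hcb) hb) ▸ hc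
  by_cases hP : (pvPalCount pal comp 0 0).1 = pal.length
  · simp [hP, hiff.mp hP]
  · have hf : (need &&& pvMask comp == need) = false :=
      Bool.eq_false_iff.mpr (fun h => hP (hiff.mpr h))
    simp [hP, hf]

-- mask of an appended letter
theorem pvMask_append (comp : List Char) (ch : Char) (b : Nat) (hb : pvBit ch = some b) :
    pvMask (comp ++ [ch]) = pvMask comp ||| (1 <<< b) := by
  simp [pvMask, List.foldl_append, hb]

-- A never succeeds when pal contains a non-letter
theorem pvLoop_none (pal : List Char) (c : Char) (hc : c ∈ pal) (hL : pvIsL c = false) :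
    ∀ (rest comp : List Char), pvEntextLoop pal rest comp 0 0 = false := by
  have hfail : ∀ comp : List Char, ¬ (pvPalCount pal comp 0 0).1 = pal.length := by
    intro comp h
    have := (pvCheck_iff pal comp).mp h c hc
    simp [hL] at this
  intro rest
  induction rest with
  | nil => intro comp; simp [pvEntextLoop, hfail comp]
  | cons ch rest ih =>
      intro comp
      simp only [pvEntextLoop]
      by_cases hch : pvIsL ch = true
      · simp [hch, ih]
      · simp [hch, hfail comp, ih]

-- main invariant: A's loop = B's have-loop continued from the current word's mask
theorem pvMainInv (pal : List Char) (need : Nat) (hneed : pvNeedLoop pal 0 = some need) :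
    ∀ (rest comp : List Char),
      pvEntextLoop pal rest comp 0 0 = pvHaveLoop need rest (pvMask comp) := by
  intro rest
  induction rest with
  | nil =>
      intro comp
      simp only [pvEntextLoop, pvHaveLoop]
      exact pvBoundary pal comp need hneed
  | cons ch rest ih =>
      intro comp
      simp only [pvEntextLoop, pvHaveLoop]
      cases hb : pvBit ch with
      | some b =>
          have hL : pvIsL ch = true := by
            by_contra h
            have := (pvBit_none_iff ch).mpr (by simpa using h)
            simp [this] at hb
          rw [if_pos hL, ih (comp ++ [ch]), pvMask_append comp ch b hb]
      | none =>
          have hL : pvIsL ch = false := (pvBit_none_iff ch).mp hb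
          rw [if_neg (by simp [hL])]
          have hbd := pvBoundary pal comp need hneed
          by_cases hp : (pvPalCount pal comp 0 0).1 = pal.length
          · have : (need &&& pvMask comp == need) = true := by rw [← hbd]; simp [hp]
            simp [hp, this]
          · have hc : (need &&& pvMask comp == need) = false := by rw [← hbd]; simp [hp]
            have h1 : pvEntextLoop pal rest [] 0 0 = pvHaveLoop need rest 0 := by
              have h2 := ih []
              rwa [show pvMask ([] : List Char) = 0 from rfl] at h2
            simp [hp, hc, h1]

-- ===== VERDICT (by name: the statement is the Claim_ definition above) =====
theorem entext_spec : Claim_equal_entext := by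
  intro text pal _
  unfold Spec_entext entext entext_alt
  cases hneed : pvNeedLoop pal.toList 0 with
  | none =>
      obtain ⟨c, hc, hL⟩ := pvNeedLoop_none pal.toList 0 hneed
      simp [pvLoop_none pal.toList c hc hL]
  | some need =>
      have h1 := pvMainInv pal.toList need hneed text.toList []
      rw [show pvMask ([] : List Char) = 0 from rfl] at h1
      simpa using h1
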